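-- pv_equiv track=rewrite | github.com/RaghhavDTurki/Atocder_Contests_Solutions | Beginner_Contest_192/C_Kaprekar_Number.py | f
-- ===== SOURCE A (Python) =====
-- def convert(list):
--
--     # Converting integer list to string list
--     s = [str(i) for i in list]
--
--     # Join list items using join()
--     res = int("".join(s))
--
--     return(res)
--
-- def f(a):
--     g1 = [int(x) for x in str(a)]
--     g1.sort(reverse=True)
--     g2 = [int(x) for x in str(a)]
--     g2.sort()
--     g_1 = convert(g1)
--     g_2 = convert(g2)
--     f = g_1 - g_2
--     return f
-- ===== SOURCE B (Python) =====
-- def f(a):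
--     count = [0] * 10
--     for ch in str(a):
--         count[int(ch)] += 1
--     desc = "".join(str(d) * count[d] for d in range(9, -1, -1))
--     asc = "".join(str(d) * count[d] for d in range(10))
--     return int(desc) - int(asc)
-- ===== Notes on version B (the rewrite author's own statement) =====
-- stated objective: alternative
-- what changed: Replaces the two comparison sorts of the digit list (sort + join + int, twice) with a single histogram pass over the digits followed by a fixed 0..9 / 9..0 emit (counting sort over the digit alphabet).
import Mathlib
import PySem

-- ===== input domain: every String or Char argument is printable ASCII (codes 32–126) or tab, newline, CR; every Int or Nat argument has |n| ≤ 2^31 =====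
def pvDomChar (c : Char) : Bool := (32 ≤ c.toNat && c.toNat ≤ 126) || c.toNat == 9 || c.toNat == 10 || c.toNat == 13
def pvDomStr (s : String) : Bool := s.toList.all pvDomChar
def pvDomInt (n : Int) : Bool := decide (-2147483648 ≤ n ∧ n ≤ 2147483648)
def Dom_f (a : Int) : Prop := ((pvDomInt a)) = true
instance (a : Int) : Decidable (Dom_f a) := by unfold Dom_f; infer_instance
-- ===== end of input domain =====

-- B replaces A's two comparison sorts of the digit list by one digit histogram plus a fixed 9..0 / 0..9 emit (counting sort); equivalence is on the return value.

-- ===== PORT A =====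
-- helper 'convert': int("".join([str(i) for i in list])); int() never raises here under Pre_f, so .getD 0 is unreachable
def convertA (l : List Int) : Int :=
  (PySem.Int.ofChars? (PySem.Chars.join [] (l.map PySem.Int.toChars))).getD 0

-- literal port of A; 'int(x)' on a char of str(a) is ofChars? [x]; none (ValueError, a < 0) is excluded by Pre_f, so .getD 0 is unreachable
def f (a : Int) : Int :=
  let g1 := PySem.List.sorted ((PySem.Int.toChars a).map (fun x => (PySem.Int.ofChars? [x]).getD 0)) (fun x => x) true
  let g2 := PySem.List.sorted ((PySem.Int.toChars a).map (fun x => (PySem.Int.ofChars? [x]).getD 0)) (fun x => x) false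
  convertA g1 - convertA g2

-- ===== PORT B =====
-- literal port of Source B: histogram over str(a) ('count[int(ch)] += 1'), then emit str(d)*count[d] for d = 9..0 and d = 0..9;
-- under Pre_f every ch is a digit, so int(ch) ∈ [0,9] and the list indexings are in range (.toNat / .getD 0 unreachable otherwise)
def f_alt (a : Int) : Int :=
  let count := (PySem.Int.toChars a).foldl
    (fun cnt ch =>
      let i := ((PySem.Int.ofChars? [ch]).getD 0).toNat
      cnt.set i (cnt.getD i 0 + 1))
    (List.replicate 10 (0 : Int))
  let desc := (PySem.List.pyRange 9 (-1) (-1)).foldl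
    (fun s d => s ++ PySem.List.pyRepeat (PySem.Int.toChars d) (count.getD d.toNat 0)) []
  let asc := (PySem.List.pyRange 0 10 1).foldl
    (fun s d => s ++ PySem.List.pyRepeat (PySem.Int.toChars d) (count.getD d.toNat 0)) []
  (PySem.Int.ofChars? desc).getD 0 - (PySem.Int.ofChars? asc).getD 0

-- ===== PRECONDITION & SPEC =====
-- A raises ValueError on a < 0 (int('-') on the sign character of str(a)); Pre_f excludes exactly those inputs
def Pre_f (a : Int) : Prop := 0 ≤ a
instance (a : Int) : Decidable (Pre_f a) := by unfold Pre_f; infer_instance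
def pvWitness_f : Int := (495)

def Spec_f (a : Int) (out : Int) : Prop := out = f_alt a
instance (a : Int) (out : Int) : Decidable (Spec_f a out) := by unfold Spec_f; infer_instance

-- ===== CLAIM (what is proved, stated in full; the proofs are below) =====
def Claim_equal_f : Prop := ∀ (a : Int), Dom_f a → Pre_f a → Spec_f a (f a)

-- ===== LEMMAS AND PROOFS =====

-- the characters str produces for a nonnegative int are decimal digits
theorem pv_digitChar_mem (k : Nat) (h : k < 10) :
    Nat.digitChar k ∈ (['0','1','2','3','4','5','6','7','8','9'] : List Char) := by
  interval_cases k <;> decide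

theorem pv_mem_toDigitsCore (fuel : Nat) :
    ∀ (n : Nat) (l : List Char) (c : Char), c ∈ Nat.toDigitsCore 10 fuel n l →
      c ∈ (['0','1','2','3','4','5','6','7','8','9'] : List Char) ∨ c ∈ l := by
  induction fuel with
  | zero => intro n l c hc; exact Or.inr hc
  | succ fuel ih =>
    intro n l c hc
    simp only [Nat.toDigitsCore] at hc
    by_cases h : n / 10 = 0
    · rw [if_pos h] at hc
      rcases List.mem_cons.mp hc with rfl | hc
      · exact Or.inl (pv_digitChar_mem _ (Nat.mod_lt _ (by norm_num)))
      · exact Or.inr hc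
    · rw [if_neg h] at hc
      rcases ih _ _ _ hc with h1 | h1
      · exact Or.inl h1
      · rcases List.mem_cons.mp h1 with rfl | h1
        · exact Or.inl (pv_digitChar_mem _ (Nat.mod_lt _ (by norm_num)))
        · exact Or.inr h1

theorem pv_mem_toChars (a : Int) (ha : 0 ≤ a) (c : Char) (hc : c ∈ PySem.Int.toChars a) :
    c ∈ (['0','1','2','3','4','5','6','7','8','9'] : List Char) := by
  unfold PySem.Int.toChars at hc
  rw [if_neg (by omega)] at hc
  rcases pv_mem_toDigitsCore _ _ _ _ hc with h | h
  · exact h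
  · simp at h

-- facts about a single digit character
theorem pv_val_bounds (c : Char) (hc : c ∈ (['0','1','2','3','4','5','6','7','8','9'] : List Char)) :
    0 ≤ (PySem.Int.ofChars? [c]).getD 0 ∧ (PySem.Int.ofChars? [c]).getD 0 ≤ 9 := by
  fin_cases hc <;> decide

-- counting-sort shape lemmas
theorem pv_emit_pairwise (r : Int → Int → Prop) (hrefl : ∀ d, r d d) (n : Int → Nat) :
    ∀ (b : List Int), b.Pairwise r →
      (b.flatMap (fun d => List.replicate (n d) d)).Pairwise r := by
  intro b
  induction b with
  | nil => intro _; simp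
  | cons d b ih =>
    intro hb
    rw [List.pairwise_cons] at hb
    rw [List.flatMap_cons, List.pairwise_append]
    refine ⟨?_, ih hb.2, ?_⟩
    · exact List.pairwise_replicate.mpr (.inr (hrefl d))
    · intro x hx y hy
      obtain rfl := List.eq_of_mem_replicate hx
      obtain ⟨d', hd', hy'⟩ := List.mem_flatMap.mp hy
      obtain rfl := List.eq_of_mem_replicate hy'
      exact hb.1 _ hd'

theorem pv_count_emit (n : Int → Nat) (x : Int) :
    ∀ (b : List Int), b.Nodup →
      (b.flatMap (fun d => List.replicate (n d) d)).count x = if x ∈ b then n x else 0 := by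
  intro b
  induction b with
  | nil => intro _; simp
  | cons d b ih =>
    intro hb
    rw [List.nodup_cons] at hb
    rw [List.flatMap_cons, List.count_append, List.count_replicate, ih hb.2]
    by_cases hxd : x = d
    · subst hxd
      simp [hb.1]
    · simp [hxd, Ne.symm hxd]

theorem pv_perm_emit (ds b : List Int) (hb : b.Nodup) (hcover : ∀ x ∈ ds, x ∈ b) :
    (b.flatMap (fun d => List.replicate (ds.count d) d)).Perm ds := by
  rw [List.perm_iff_count]
  intro x
  rw [pv_count_emit _ x b hb]
  by_cases hx : x ∈ b
  · simp [hx]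
  · rw [if_neg hx]
    exact (List.count_eq_zero.mpr (fun h => hx (hcover x h))).symm

theorem pv_sorted_asc (ds : List Int) (h : ∀ x ∈ ds, 0 ≤ x ∧ x ≤ 9) :
    PySem.List.sorted ds (fun x => x) false
      = ([0,1,2,3,4,5,6,7,8,9] : List Int).flatMap (fun d => List.replicate (ds.count d) d) := by
  apply PySem.List.eq_of_perm_of_pairwise_le_of_injective (fun x : Int => x) (fun _ _ h => h)
  · exact (PySem.List.sorted_perm ds (fun x => x) false).trans
      (pv_perm_emit ds _ (by decide) (by intro x hx; have := h x hx; simp; omega)).symm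
  · exact PySem.List.sorted_pairwise ds (fun x => x)
  · exact pv_emit_pairwise _ (fun d => le_refl d) _ _ (by decide)

theorem pv_sorted_desc (ds : List Int) (h : ∀ x ∈ ds, 0 ≤ x ∧ x ≤ 9) :
    PySem.List.sorted ds (fun x => x) true
      = ([9,8,7,6,5,4,3,2,1,0] : List Int).flatMap (fun d => List.replicate (ds.count d) d) := by
  apply PySem.List.eq_of_perm_of_pairwise_le_of_injective (fun x : Int => -x) neg_injective
  · exact (PySem.List.sorted_perm ds (fun x => x) true).trans
      (pv_perm_emit ds _ (by decide) (by intro x hx; have := h x hx; simp; omega)).symm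
  · exact (PySem.List.sorted_pairwise_rev ds (fun x => x)).imp (fun hab => by omega)
  · exact pv_emit_pairwise (fun a b => -a ≤ -b) (fun d => le_refl _) _ _ (by
      norm_num [List.pairwise_cons])

theorem pv_join_nil (xs : List (List Char)) : PySem.Chars.join [] xs = xs.flatten := by
  induction xs with
  | nil => rfl
  | cons x t ih => simp [PySem.Chars.join, List.intercalate] at ih ⊢; cases t <;> simp_all

theorem pv_flatten_replicate (n : Nat) (c : Char) :
    (List.replicate n [c]).flatten = List.replicate n c := by
  induction n with
  | zero => rfl
  | succ n ih => simp [List.replicate_succ, ih]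

-- the histogram loop of B computes the digit multiplicities
theorem pv_counts (cs : List Char)
    (h : ∀ c ∈ cs, c ∈ (['0','1','2','3','4','5','6','7','8','9'] : List Char)) :
    ∀ (cnt : List Int), 10 ≤ cnt.length →
      (cs.foldl (fun cnt ch =>
          let i := ((PySem.Int.ofChars? [ch]).getD 0).toNat
          cnt.set i (cnt.getD i 0 + 1)) cnt).length = cnt.length ∧
      ∀ j : Nat, j < cnt.length →
        (cs.foldl (fun cnt ch =>
            let i := ((PySem.Int.ofChars? [ch]).getD 0).toNat
            cnt.set i (cnt.getD i 0 + 1)) cnt).getD j 0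
          = cnt.getD j 0 + ((cs.map (fun x => (PySem.Int.ofChars? [x]).getD 0)).count (j : Int) : Int) := by
  induction cs with
  | nil => intro cnt _; simp
  | cons c cs ih =>
    intro cnt hlen
    have hc := h c List.mem_cons_self
    have hrest : ∀ c ∈ cs, c ∈ (['0','1','2','3','4','5','6','7','8','9'] : List Char) :=
      fun x hx => h x (List.mem_cons_of_mem c hx)
    have hv := pv_val_bounds c hc
    set v := (PySem.Int.ofChars? [c]).getD 0 with hvdef
    have hi : v.toNat < cnt.length := by omega
    obtain ⟨ih1, ih2⟩ := ih hrest (cnt.set v.toNat (cnt.getD v.toNat 0 + 1))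
      (by rw [List.length_set]; exact hlen)
    constructor
    · simp only [List.foldl_cons]
      rw [ih1, List.length_set]
    · intro j hj
      simp only [List.foldl_cons]
      rw [ih2 j (by rw [List.length_set]; exact hj)]
      have hset : (cnt.set v.toNat (cnt.getD v.toNat 0 + 1)).getD j 0
          = if v.toNat = j then cnt.getD j 0 + 1 else cnt.getD j 0 := by
        rcases eq_or_ne v.toNat j with h1 | h1
        · subst h1
          simp [List.getD_eq_getElem?_getD, hi]
        · simp [List.getD_eq_getElem?_getD, h1]
      rw [hset, List.map_cons, List.count_cons]
      rcases eq_or_ne v.toNat j with heq | heq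
      · rw [if_pos heq]
        have hv' : (PySem.Int.ofChars? [c]).getD 0 = (j : Int) := by rw [← hvdef]; omega
        simp only [hv', beq_self_eq_true, if_true]
        push_cast
        ring
      · rw [if_neg heq]
        have hv' : (PySem.Int.ofChars? [c]).getD 0 ≠ (j : Int) := by rw [← hvdef]; omega
        rw [if_neg (by simp [hv'])]
        push_cast
        ring

-- ===== VERDICT (by name: the statement is the Claim_ definition above) =====
theorem f_spec : Claim_equal_f := by
  intro a _ ha
  unfold Spec_f f f_alt convertA
  simp only []
  have hdig : ∀ c ∈ PySem.Int.toChars a, c ∈ (['0','1','2','3','4','5','6','7','8','9'] : List Char) :=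
    fun c hc => pv_mem_toChars a ha c hc
  set cs := PySem.Int.toChars a with hcs
  set ds := cs.map (fun x => (PySem.Int.ofChars? [x]).getD 0) with hds
  have hb : ∀ x ∈ ds, 0 ≤ x ∧ x ≤ 9 := by
    intro x hx
    obtain ⟨c, hc, rfl⟩ := List.mem_map.mp hx
    exact pv_val_bounds c (hdig c hc)
  rw [pv_sorted_desc ds hb, pv_sorted_asc ds hb]
  obtain ⟨hlen, hget⟩ := pv_counts cs hdig (List.replicate 10 0) (by simp)
  have hD : ∀ j : Nat, j < 10 →
      (cs.foldl (fun cnt ch =>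
        let i := ((PySem.Int.ofChars? [ch]).getD 0).toNat
        cnt.set i (cnt.getD i 0 + 1)) (List.replicate 10 0)).getD j 0 = (ds.count (j : Int) : Int) := by
    intro j hj
    rw [hget j (by simpa using hj)]
    simp [← hds]
    interval_cases j <;> rfl
  have hr1 : PySem.List.pyRange 9 (-1) (-1) = [9,8,7,6,5,4,3,2,1,0] := by decide
  have hr2 : PySem.List.pyRange 0 10 1 = [0,1,2,3,4,5,6,7,8,9] := by decide
  rw [hr1, hr2]
  simp only [List.foldl_cons, List.foldl_nil, List.flatMap_cons, List.flatMap_nil, List.append_nil]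
  rw [hD (Int.toNat 9) (by norm_num), hD (Int.toNat 8) (by norm_num), hD (Int.toNat 7) (by norm_num),
      hD (Int.toNat 6) (by norm_num), hD (Int.toNat 5) (by norm_num), hD (Int.toNat 4) (by norm_num),
      hD (Int.toNat 3) (by norm_num), hD (Int.toNat 2) (by norm_num), hD (Int.toNat 1) (by norm_num),
      hD (Int.toNat 0) (by norm_num)]
  have t0 : PySem.Int.toChars 0 = ['0'] := by decide
  have t1 : PySem.Int.toChars 1 = ['1'] := by decide
  have t2 : PySem.Int.toChars 2 = ['2'] := by decide
  have t3 : PySem.Int.toChars 3 = ['3'] := by decide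
  have t4 : PySem.Int.toChars 4 = ['4'] := by decide
  have t5 : PySem.Int.toChars 5 = ['5'] := by decide
  have t6 : PySem.Int.toChars 6 = ['6'] := by decide
  have t7 : PySem.Int.toChars 7 = ['7'] := by decide
  have t8 : PySem.Int.toChars 8 = ['8'] := by decide
  have t9 : PySem.Int.toChars 9 = ['9'] := by decide
  norm_num [t0, t1, t2, t3, t4, t5, t6, t7, t8, t9, PySem.List.pyRepeat_singleton,
    pv_join_nil, List.map_append, List.map_replicate, List.flatten_append,
    pv_flatten_replicate, List.append_assoc, Int.toNat_natCast]
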